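-- pv_equiv track=rewrite | github.com/chag60460/cogrob-grand-challenge | Benchmark/quine_mccluskey_algo/utils.py | count_minterms
-- ===== SOURCE A (Python) =====
-- def count_minterms(oneMinterms,primeDict):
--     '''
--     Count how often a minterm is included in a dictionary of implicants
--     Input 1: Dictionary where the keys are implicant names and the values are binary representations of minterms
--     Input 2: list with the minterms we want to count
--     Output: list with the count of each minterm (the indexes line up)
--     '''
--     countList = [0]*len(oneMinterms)
--     for i in range(len(oneMinterms)):
--         for allMinNames in primeDict.keys():
--             # make a list where each element is the name of a minterm
--             listMinNames = list(allMinNames.split(","))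
--             for indvMinName in listMinNames:
--                 # if the solution covers that minterm, add to the count
--                 if indvMinName == oneMinterms[i]:
--                     countList[i] += 1
--
--     return(countList)
-- ===== SOURCE B (Python) =====
-- def count_minterms(oneMinterms, primeDict):
--     counts = {}
--     for key in primeDict.keys():
--         for name in key.split(","):
--             counts[name] = counts.get(name, 0) + 1
--     return [counts.get(m, 0) for m in oneMinterms]
-- ===== Notes on version B (the rewrite author's own statement) =====
-- stated objective: faster
-- what changed: Instead of rescanning and re-splitting every dict key for each minterm, B splits each key once, tallies all names into one dict in a single pass, and maps each minterm to its tally.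
import Mathlib
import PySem

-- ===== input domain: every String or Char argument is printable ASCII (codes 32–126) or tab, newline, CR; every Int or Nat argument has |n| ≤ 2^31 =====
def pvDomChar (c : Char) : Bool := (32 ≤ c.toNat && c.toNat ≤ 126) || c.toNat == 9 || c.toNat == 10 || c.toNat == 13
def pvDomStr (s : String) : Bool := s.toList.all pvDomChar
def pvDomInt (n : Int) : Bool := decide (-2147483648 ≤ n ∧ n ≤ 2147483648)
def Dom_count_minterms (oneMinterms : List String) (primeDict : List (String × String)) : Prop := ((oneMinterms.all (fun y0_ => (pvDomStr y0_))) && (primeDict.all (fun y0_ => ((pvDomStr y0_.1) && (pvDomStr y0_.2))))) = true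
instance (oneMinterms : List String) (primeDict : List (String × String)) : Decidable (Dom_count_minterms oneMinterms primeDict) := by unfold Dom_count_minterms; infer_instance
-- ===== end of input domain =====

-- B replaces A's per-minterm rescan of all keys by a single tally pass over the keys
-- followed by one lookup per minterm (objective: faster).

-- ===== PORT A =====
-- literal port of A: countList = [0]*len, then for i in range(len): for key in dict: for name in key.split(","): if name == oneMinterms[i]: countList[i] += 1
def count_minterms (oneMinterms : List String) (primeDict : List (String × String)) : List Int :=
  (PySem.List.pyRange 0 (oneMinterms.length : Int) 1).foldl
    (fun countList i =>
      ((PySem.Dict.ofList primeDict).keys).foldl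
        (fun cl allMinNames =>
          ((PySem.Str.split? allMinNames ",").getD []).foldl
            (fun cl indvMinName =>
              if indvMinName == PySem.List.pyGetD oneMinterms i "" then
                PySem.List.pySetD cl i (PySem.List.pyGetD cl i 0 + 1)
              else cl)
            cl)
        countList)
    (List.replicate oneMinterms.length (0 : Int))

-- ===== PORT B =====
-- literal port of B: counts = {}; for key in dict: for name in key.split(","): counts[name] = counts.get(name,0)+1; return [counts.get(m,0) for m in oneMinterms]
def count_minterms_alt (oneMinterms : List String) (primeDict : List (String × String)) : List Int :=
  let counts : PySem.Dict String Int :=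
    ((PySem.Dict.ofList primeDict).keys).foldl
      (fun d key =>
        ((PySem.Str.split? key ",").getD []).foldl
          (fun d name => d.insert name (d.getD name 0 + 1)) d)
      PySem.Dict.empty
  oneMinterms.map (fun m => counts.getD m 0)

-- ===== PRECONDITION & SPEC =====
def Spec_count_minterms (oneMinterms : List String) (primeDict : List (String × String)) (out : List Int) : Prop := out = count_minterms_alt oneMinterms primeDict
instance (oneMinterms : List String) (primeDict : List (String × String)) (out : List Int) : Decidable (Spec_count_minterms oneMinterms primeDict out) := by unfold Spec_count_minterms; infer_instance

-- ===== CLAIM (what is proved, stated in full; the proofs are below) =====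
def Claim_equal_count_minterms : Prop := ∀ (oneMinterms : List String) (primeDict : List (String × String)), Dom_count_minterms oneMinterms primeDict → Spec_count_minterms oneMinterms primeDict (count_minterms oneMinterms primeDict)

-- ===== LEMMAS AND PROOFS =====

-- all minterm names produced by splitting every dict key, in order
def pvNames (primeDict : List (String × String)) : List String :=
  ((PySem.Dict.ofList primeDict).keys).flatMap (fun k => (PySem.Str.split? k ",").getD [])

-- a nested 'for x in l: for y in f x: acc = g acc y' is a fold over the flattened names
theorem pv_nested_foldl {α β γ : Type} (l : List α) (f : α → List β) (g : γ → β → γ) (init : γ) :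
    l.foldl (fun acc x => (f x).foldl g acc) init = (l.flatMap f).foldl g init := by
  rw [List.flatMap_def, List.foldl_flatten, List.foldl_map]

-- the inner conditional-increment loop of A adds the match count at index i
theorem pv_set_count (ns : List String) (m : String) (i : Nat) :
    ∀ cl : List Int,
      ns.foldl (fun cl name => if name == m then cl.set i (cl.getD i 0 + 1) else cl) cl
        = cl.set i (cl.getD i 0 + ns.count m) := by
  induction ns with
  | nil =>
    intro cl
    simp only [List.foldl_nil, List.count_nil, Nat.cast_zero, add_zero]
    rcases Nat.lt_or_ge i cl.length with h | h
    · rw [List.getD_eq_getElem _ _ h, List.set_getElem_self h]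
    · rw [List.set_eq_of_length_le h]
  | cons a ns ih =>
    intro cl
    by_cases ha : a = m
    · subst ha
      simp only [List.foldl_cons, BEq.rfl, if_pos, List.count_cons_self, ih]
      rcases Nat.lt_or_ge i cl.length with h | h
      · have h' : i < (cl.set i (cl.getD i 0 + 1)).length := by simpa using h
        rw [List.set_set]
        congr 1
        rw [List.getD_eq_getElem _ _ h', List.getElem_set_self]
        rw [List.getD_eq_getElem _ _ h]
        push_cast; ring
      · simp [List.set_eq_of_length_le h]
    · rw [List.foldl_cons, if_neg (by simpa using ha), ih cl, List.count_cons_of_ne ha]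

-- A's outer loop: successive in-place increments at indices 0..n-1
theorem pv_outer (c : Nat → Int) :
    ∀ (n : Nat) (cl : List Int), n ≤ cl.length →
      (List.range n).foldl (fun cl k => cl.set k (cl.getD k 0 + c k)) cl
        = (List.range n).map (fun k => cl.getD k 0 + c k) ++ cl.drop n := by
  intro n
  induction n with
  | zero => intro cl _; simp
  | succ n ih =>
    intro cl h
    have hn : n < cl.length := h
    rw [List.range_succ, List.foldl_append, ih cl (Nat.le_of_lt hn)]
    simp only [List.foldl_cons, List.foldl_nil]
    have hlen : ((List.range n).map (fun k => cl.getD k 0 + c k)).length = n := by simp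
    have hget : ((List.range n).map (fun k => cl.getD k 0 + c k) ++ cl.drop n).getD n 0 = cl.getD n 0 := by
      rw [List.getD_eq_getElem?_getD, List.getElem?_append_right (by rw [hlen]), hlen]
      simp [List.getElem?_drop, List.getD_eq_getElem?_getD]
    rw [hget]
    rw [List.set_append_right _ _ (by rw [hlen]), hlen, Nat.sub_self,
        List.drop_eq_getElem_cons hn, List.set_cons_zero]
    simp

-- B computes, for each minterm, its count among all split names
theorem pv_alt_eq (o : List String) (p : List (String × String)) :
    count_minterms_alt o p = o.map (fun m => ((pvNames p).count m : Int)) := by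
  unfold count_minterms_alt pvNames
  rw [pv_nested_foldl]
  refine List.map_congr_left (fun m _ => ?_)
  rw [PySem.Dict.getD_foldl_insert_add_one]
  simp [PySem.Dict.empty, PySem.Dict.getD, PySem.Dict.get?]

-- A computes the same list
theorem pv_a_eq (o : List String) (p : List (String × String)) :
    count_minterms o p = o.map (fun m => ((pvNames p).count m : Int)) := by
  unfold count_minterms
  rw [PySem.List.pyRange_zero_nat, List.foldl_map]
  have hstep : ∀ (cl : List Int) (k : Nat), k ∈ List.range o.length →
      ((PySem.Dict.ofList p).keys).foldl
        (fun cl allMinNames =>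
          ((PySem.Str.split? allMinNames ",").getD []).foldl
            (fun cl indvMinName =>
              if indvMinName == PySem.List.pyGetD o (k : Int) "" then
                PySem.List.pySetD cl (k : Int) (PySem.List.pyGetD cl (k : Int) 0 + 1)
              else cl) cl) cl
      = cl.set k (cl.getD k 0 + ((pvNames p).count (o.getD k ""))) := by
    intro cl k _
    rw [pv_nested_foldl]
    simp only [PySem.List.pyGetD_natCast, PySem.List.pySetD_natCast]
    exact pv_set_count (pvNames p) (o.getD k "") k cl
  rw [PySem.List.foldl_congr_mem _ _ _ _ hstep]
  rw [pv_outer _ o.length (List.replicate o.length 0) (by simp)]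
  apply List.ext_getElem
  · simp
  · intro j h1 h2
    simp only [List.getElem_append, List.length_map, List.length_range] at *
    have hj : j < o.length := by simpa using h2
    rw [dif_pos (by simpa using hj)]
    simp [hj]

-- ===== VERDICT (by name: the statement is the Claim_ definition above) =====
theorem count_minterms_spec : Claim_equal_count_minterms := by
  intro o p _
  unfold Spec_count_minterms
  rw [pv_a_eq, pv_alt_eq]
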